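-- pv_equiv track=rewrite | github.com/fvrrrn/hglib | utils.py | exclusions_lazy
-- ===== SOURCE A (Python) =====
-- from itertools import combinations
-- from collections import Counter
--
-- def exclusions_lazy(iterable1, iterable2):
--     required = set(iterable1) - set(iterable2)
--     required_counts = Counter(c for c in iterable1 if c in required)
--
--     n = len(iterable1)
--     iterable1 = tuple(iterable1)
--
--     for r in range(1, n + 1):
--         for comb in combinations(range(n), r):
--             sub = tuple(iterable1[i] for i in comb)
--             sub_counts = Counter(sub)
--
--             if all(sub_counts[sym] == required_counts[sym] for sym in required):
--                 yield ''.join(sub)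
-- ===== SOURCE B (Python) =====
-- from itertools import combinations
--
-- def _merge(xs, ys):
--     # two-pointer merge of two sorted index lists
--     out = []
--     i = j = 0
--     while i < len(xs) and j < len(ys):
--         if xs[i] <= ys[j]:
--             out.append(xs[i]); i += 1
--         else:
--             out.append(ys[j]); j += 1
--     return out + list(xs[i:]) + list(ys[j:])
--
-- def exclusions_lazy(iterable1, iterable2):
--     # Every occurrence of an exclusive symbol is mandatory, so split the
--     # positions into fixed "must" positions and "free" positions, enumerate
--     # only subsets of the free positions, and splice each subset into the
--     # fixed positions with a merge.
--     chars = tuple(iterable1)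
--     excluded = set(iterable2)
--     exclusive = {c for c in chars if c not in excluded}
--     must = [i for i, c in enumerate(chars) if c in exclusive]
--     free = [i for i, c in enumerate(chars) if c not in exclusive]
--     start = 1 if not must else 0
--     for k in range(start, len(free) + 1):
--         for fcomb in combinations(free, k):
--             yield ''.join(chars[i] for i in _merge(must, fcomb))
-- ===== Notes on version B (the rewrite author's own statement) =====
-- stated objective: faster
-- what changed: A generates all 2^n index combinations and filters each with Counter comparisons; B splits the positions into fixed 'must' positions (occurrences of exclusive symbols, which every valid subsequence has to contain) and free positions, enumerates only subsets of the free positions and splices each into the must positions with a two-pointer sorted merge, so no candidate is ever rejected (intended as faster; measured 3.62x at the largest size both finished, n=16; neither finishes n=64, where the output itself is exponential).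
import Mathlib
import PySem

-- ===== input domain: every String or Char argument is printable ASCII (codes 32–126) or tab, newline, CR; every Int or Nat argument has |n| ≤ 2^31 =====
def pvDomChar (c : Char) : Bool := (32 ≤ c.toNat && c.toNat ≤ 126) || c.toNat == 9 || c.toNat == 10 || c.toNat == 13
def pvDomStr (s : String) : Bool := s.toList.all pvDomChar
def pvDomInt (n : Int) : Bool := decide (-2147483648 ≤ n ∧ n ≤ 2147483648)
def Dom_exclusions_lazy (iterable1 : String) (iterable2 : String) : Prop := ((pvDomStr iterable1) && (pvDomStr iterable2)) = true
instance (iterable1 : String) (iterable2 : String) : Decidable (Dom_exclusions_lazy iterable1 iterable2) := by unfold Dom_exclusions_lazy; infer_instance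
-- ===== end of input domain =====

-- B replaces A's generate-all-2^n-index-combinations-and-filter with a split of the positions
-- into mandatory ("must": occurrences of exclusive symbols) and free ones; it enumerates only
-- subsets of the free positions and splices each into the fixed must positions by a sorted merge
-- (intended as faster; a timing run measured B 3.62x faster at the largest size both
-- Pythons finished, n=16; neither finishes n=64, where the output itself is exponential).
-- Both Pythons are generators; the equality proved is about the full sequence of yielded strings.

-- ===== PORT A =====
-- itertools.combinations(l, r) over a list of distinct elements, lexicographic order
def pvCombos (l : List Nat) (r : Nat) : List (List Nat) :=
  match l, r with
  | _, 0 => [[]]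
  | [], _+1 => []
  | x :: xs, r+1 => ((pvCombos xs r).map (fun c => x :: c)) ++ pvCombos xs (r+1)

def exclusions_lazy (iterable1 : String) (iterable2 : String) : List String :=
  let chars := iterable1.toList
  let required : PySem.Set Char :=
    PySem.Set.diff (PySem.Set.ofList chars) (PySem.Set.ofList iterable2.toList)
  let required_counts : PySem.Dict Char Int :=
    PySem.Dict.counter (chars.filter (fun c => PySem.Set.contains required c))
  let n := chars.length
  -- indices produced by combinations(range(n), r) are always in range, so
  -- iterable1[i] is ported as the total chars.getD i ' ' (exact on in-range indices)
  (List.range' 1 n).flatMap (fun r =>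
    (pvCombos (List.range n) r).filterMap (fun comb =>
      let sub := comb.map (fun i => chars.getD i ' ')
      let sub_counts := PySem.Dict.counter sub
      if required.all (fun sym =>
           PySem.Dict.getD sub_counts sym 0 == PySem.Dict.getD required_counts sym 0)
      then some (String.ofList sub) else none))

-- ===== PORT B =====
-- _merge of Source B: two-pointer merge of two sorted index lists
def pvMerge : List Nat → List Nat → List Nat
  | [], ys => ys
  | x :: xs, [] => x :: xs
  | x :: xs, y :: ys =>
      if x ≤ y then x :: pvMerge xs (y :: ys) else y :: pvMerge (x :: xs) ys

def exclusions_lazy_alt (iterable1 : String) (iterable2 : String) : List String :=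
  let chars := iterable1.toList
  let excluded : PySem.Set Char := PySem.Set.ofList iterable2.toList
  let exclusive : PySem.Set Char :=
    PySem.Set.ofList (chars.filter (fun c => !(PySem.Set.contains excluded c)))
  -- [i for i, c in enumerate(chars) if c in exclusive] / [... if c not in exclusive]
  let must := (List.range chars.length).filter
      (fun i => PySem.Set.contains exclusive (chars.getD i ' '))
  let free := (List.range chars.length).filter
      (fun i => !(PySem.Set.contains exclusive (chars.getD i ' ')))
  let start := if must.isEmpty then 1 else 0
  (List.range' start (free.length + 1 - start)).flatMap (fun k =>
    (pvCombos free k).map (fun fcomb =>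
      String.ofList ((pvMerge must fcomb).map (fun i => chars.getD i ' '))))

-- ===== PRECONDITION & SPEC =====
def Spec_exclusions_lazy (iterable1 : String) (iterable2 : String) (out : List String) : Prop := out = exclusions_lazy_alt iterable1 iterable2
instance (iterable1 : String) (iterable2 : String) (out : List String) : Decidable (Spec_exclusions_lazy iterable1 iterable2 out) := by unfold Spec_exclusions_lazy; infer_instance

-- ===== CLAIM (what is proved, stated in full; the proofs are below) =====
def Claim_equal_exclusions_lazy : Prop := ∀ (iterable1 : String) (iterable2 : String), Dom_exclusions_lazy iterable1 iterable2 → Spec_exclusions_lazy iterable1 iterable2 (exclusions_lazy iterable1 iterable2)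

-- ===== LEMMAS AND PROOFS =====

theorem pvAllCongrMem {α : Type} {l : List α} {f g : α → Bool}
    (h : ∀ x ∈ l, f x = g x) : l.all f = l.all g := by
  induction l with
  | nil => rfl
  | cons a l ih =>
    simp only [List.all_cons, h a (by simp), ih (fun x hx => h x (by simp [hx]))]

theorem pvCombos_sublist {l : List Nat} {r : Nat} {c : List Nat}
    (h : c ∈ pvCombos l r) : c.Sublist l := by
  induction l generalizing r c with
  | nil =>
    cases r with
    | zero => simp [pvCombos] at h; simp [h]
    | succ r => simp [pvCombos] at h
  | cons x xs ih =>
    cases r with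
    | zero => simp [pvCombos] at h; simp [h]
    | succ r =>
      simp only [pvCombos, List.mem_append, List.mem_map] at h
      rcases h with ⟨c', hc', rfl⟩ | h
      · exact List.Sublist.cons₂ x (ih hc')
      · exact List.Sublist.cons x (ih h)

theorem pvFilterMap_if {α β : Type} (p : α → Bool) (f : α → β) (l : List α) :
    l.filterMap (fun x => if p x then some (f x) else none) = (l.filter p).map f := by
  induction l with
  | nil => rfl
  | cons a l ih =>
    by_cases h : p a = true <;> simp [h, ih]

theorem pvCountEqCountP (xs : List Char) (a : Char) :
    xs.count a = xs.countP (fun x => x == a) := by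
  induction xs with
  | nil => rfl
  | cons x xs ih => rw [List.count_cons, List.countP_cons, ih]

theorem pvMapGetDRange (l : List Char) (d : Char) :
    (List.range l.length).map (fun i => l.getD i d) = l := by
  apply List.ext_getElem
  · simp
  · intro i h1 h2
    simp only [List.getElem_map, List.getElem_range]
    rw [List.getD_eq_getElem?_getD, List.getElem?_eq_getElem h2]
    rfl

theorem pvCountPSublistIff {c l : List Nat} (q : Nat → Bool)
    (hs : c.Sublist l) (hn : l.Nodup) :
    c.countP q = l.countP q ↔ ∀ j ∈ l, q j = true → j ∈ c := by
  rw [List.countP_eq_length_filter, List.countP_eq_length_filter]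
  have hfs : (c.filter q).Sublist (l.filter q) := hs.filter q
  constructor
  · intro hlen j hj hq
    have heq : c.filter q = l.filter q := hfs.eq_of_length hlen
    have hmem : j ∈ l.filter q := List.mem_filter.mpr ⟨hj, hq⟩
    rw [← heq] at hmem
    exact (List.mem_filter.mp hmem).1
  · intro hsup
    have hsubset : l.filter q ⊆ c.filter q := by
      intro j hj
      rcases List.mem_filter.mp hj with ⟨hjl, hq⟩
      exact List.mem_filter.mpr ⟨hsup j hjl hq, hq⟩
    have hnd : (l.filter q).Nodup := List.Nodup.filter q hn
    have h1 : (l.filter q).length ≤ (c.filter q).length :=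
      (List.subperm_of_subset hnd hsubset).length_le
    have h2 := hfs.length_le
    omega

-- A's Counter test on a combination = "the combination contains every must position"
theorem pvCondAEq (chars : List Char) (required : List Char) (comb : List Nat)
    (hsub : comb.Sublist (List.range chars.length)) :
    (required.all (fun sym =>
        PySem.Dict.getD (PySem.Dict.counter (comb.map (fun i => chars.getD i ' '))) sym 0 ==
        PySem.Dict.getD (PySem.Dict.counter
          (chars.filter (fun c => PySem.Set.contains required c))) sym 0))
    = (((List.range chars.length).filter
          (fun j => PySem.Set.contains required (chars.getD j ' '))).all
        (fun j => decide (j ∈ comb))) := by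
  rw [Bool.eq_iff_iff]
  simp only [List.all_eq_true, PySem.Dict.getD_counter, beq_iff_eq, Nat.cast_inj,
    List.mem_filter, decide_eq_true_eq, and_imp]
  have hcontains : ∀ sym, sym ∈ required → PySem.Set.contains required sym = true :=
    fun sym h => (PySem.Set.contains_iff _ _).mpr h
  have hchars : ∀ sym : Char, List.countP (fun x => x == sym) chars =
      List.countP (fun i => chars.getD i ' ' == sym) (List.range chars.length) := by
    intro sym
    conv_lhs => rw [← pvMapGetDRange chars ' ']
    rw [List.countP_map]
    rfl
  have hcount : ∀ sym, sym ∈ required →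
      ((comb.map (fun i => chars.getD i ' ')).count sym =
        (chars.filter (fun c => PySem.Set.contains required c)).count sym
       ↔ List.countP (fun i => chars.getD i ' ' == sym) comb =
          List.countP (fun i => chars.getD i ' ' == sym) (List.range chars.length)) := by
    intro sym hsym
    rw [List.count_filter (hcontains sym hsym), pvCountEqCountP, pvCountEqCountP,
        List.countP_map, hchars sym]
    exact Iff.rfl
  constructor
  · intro hA j hj hget
    have hsymmem : chars.getD j ' ' ∈ required := (PySem.Set.contains_iff _ _).mp hget
    have h1 := (hcount _ hsymmem).mp (hA _ hsymmem)
    exact (pvCountPSublistIff _ hsub List.nodup_range).mp h1 j hj (by simp)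
  · intro hB sym hsym
    rw [hcount _ hsym]
    apply (pvCountPSublistIff _ hsub List.nodup_range).mpr
    intro j hj hq
    apply hB j hj
    have hjs : chars.getD j ' ' = sym := by simpa using hq
    rw [hjs]
    exact hcontains sym hsym

theorem pvMerge_nil_right (xs : List Nat) : pvMerge xs [] = xs := by
  cases xs <;> simp [pvMerge]

theorem pvMerge_cons_left (x : Nat) (M c : List Nat) (h : ∀ y ∈ c, x < y) :
    pvMerge (x :: M) c = x :: pvMerge M c := by
  cases c with
  | nil => rw [pvMerge_nil_right, pvMerge_nil_right]
  | cons y ys =>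
    have : x ≤ y := Nat.le_of_lt (h y (by simp))
    simp [pvMerge, this]

theorem pvMerge_cons_right (x : Nat) (M c : List Nat) (h : ∀ z ∈ M, x < z) :
    pvMerge M (x :: c) = x :: pvMerge M c := by
  cases M with
  | nil => simp [pvMerge]
  | cons z zs =>
    have : ¬ (z ≤ x) := Nat.not_le.mpr (h z (by simp))
    simp [pvMerge, this]

-- CORE: filtering the combinations of a strictly sorted list by "contains every
-- q-element" = merging the fixed q-elements into the combinations of the rest
theorem pvFilterEqMerge (q : Nat → Bool) (L : List Nat) (hL : L.Pairwise (· < ·)) (r : Nat) :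
    (pvCombos L r).filter (fun c => (L.filter q).all (fun j => decide (j ∈ c)))
    = if (L.filter q).length ≤ r
      then (pvCombos (L.filter (fun j => !q j)) (r - (L.filter q).length)).map
             (pvMerge (L.filter q))
      else [] := by
  induction L generalizing r with
  | nil =>
    cases r with
    | zero => simp [pvCombos, pvMerge]
    | succ r => simp [pvCombos]
  | cons x xs ih =>
    rcases List.pairwise_cons.mp hL with ⟨hx, hxs⟩
    have hM' : ∀ j ∈ xs.filter q, x < j := fun j hj => hx j (List.mem_filter.mp hj).1
    have hF' : ∀ j ∈ xs.filter (fun j => !q j), x < j :=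
      fun j hj => hx j (List.mem_filter.mp hj).1
    have hcomb : ∀ {k : Nat} {c : List Nat}, c ∈ pvCombos (xs.filter (fun j => !q j)) k →
        ∀ y ∈ c, x < y :=
      fun hc y hy => hF' y ((pvCombos_sublist hc).subset hy)
    have hcond : ∀ c : List Nat,
        ((x :: xs).filter q).all (fun j => decide (j ∈ (x :: c)))
        = (xs.filter q).all (fun j => decide (j ∈ c)) := by
      intro c
      have htail : ∀ j ∈ xs.filter q,
          (decide (j ∈ (x :: c)) : Bool) = decide (j ∈ c) := by
        intro j hj
        have hlt := hM' j hj
        rw [decide_eq_decide, List.mem_cons]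
        constructor
        · rintro (rfl | h)
          · omega
          · exact h
        · exact Or.inr
      by_cases hq : q x = true
      · rw [List.filter_cons_of_pos hq, List.all_cons, pvAllCongrMem htail]
        simp
      · rw [List.filter_cons_of_neg (by simp [hq]), pvAllCongrMem htail]
    cases r with
    | zero =>
      by_cases hM : ((x :: xs).filter q) = []
      · simp [pvCombos, hM, pvMerge]
      · rcases hE : (x :: xs).filter q with _ | ⟨y, M⟩
        · exact absurd hE hM
        · simp [pvCombos]
    | succ r =>
      have hunfoldC : pvCombos (x :: xs) (r+1) =
          ((pvCombos xs r).map (fun c => x :: c)) ++ pvCombos xs (r+1) := rfl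
      rw [hunfoldC, List.filter_append, List.filter_map]
      have hfirst :
          ((pvCombos xs r).filter
              ((fun c => ((x :: xs).filter q).all (fun j => decide (j ∈ c))) ∘
                (fun c => x :: c))).map (fun c => x :: c)
          = ((pvCombos xs r).filter
              (fun c => (xs.filter q).all (fun j => decide (j ∈ c)))).map
              (fun c => x :: c) := by
        congr 1
        apply List.filter_congr
        intro c _
        simpa [Function.comp] using hcond c
      rw [hfirst, ih hxs r]
      by_cases hq : q x = true
      · -- x is a must position: the combinations not containing x all fail
        have hsecond : (pvCombos xs (r+1)).filter
            (fun c => ((x :: xs).filter q).all (fun j => decide (j ∈ c))) = [] := by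
          rw [List.filter_eq_nil_iff]
          intro c hc
          have hxc : x ∉ c := by
            intro hin
            have := hx x ((pvCombos_sublist hc).subset hin)
            omega
          rw [List.filter_cons_of_pos hq]
          simp [hxc]
        rw [hsecond, List.append_nil, List.filter_cons_of_pos hq,
            List.filter_cons_of_neg (by simp [hq])]
        simp only [List.length_cons, Nat.add_le_add_iff_right, Nat.succ_sub_succ]
        by_cases hle : (xs.filter q).length ≤ r
        · rw [if_pos hle, if_pos hle, List.map_map]
          apply List.map_congr_left
          intro c hc
          simp only [Function.comp]
          exact (pvMerge_cons_left x _ c (hcomb hc)).symm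
        · rw [if_neg hle, if_neg hle, List.map_nil]
      · -- x is free
        have hsecond : (pvCombos xs (r+1)).filter
            (fun c => ((x :: xs).filter q).all (fun j => decide (j ∈ c)))
            = (pvCombos xs (r+1)).filter
                (fun c => (xs.filter q).all (fun j => decide (j ∈ c))) := by
          apply List.filter_congr
          intro c _
          rw [List.filter_cons_of_neg (by simp [hq])]
        rw [hsecond, ih hxs (r+1), List.filter_cons_of_neg (by simp [hq]),
            List.filter_cons_of_pos (by simp [hq])]
        by_cases hle : (xs.filter q).length ≤ r
        · have h1 : (xs.filter q).length ≤ r + 1 := by omega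
          rw [if_pos hle, if_pos h1, if_pos h1]
          have hr1 : r + 1 - (xs.filter q).length = (r - (xs.filter q).length) + 1 := by
            omega
          rw [hr1]
          have hunfoldF : pvCombos (x :: xs.filter (fun j => !q j))
              ((r - (xs.filter q).length) + 1) =
              ((pvCombos (xs.filter (fun j => !q j)) (r - (xs.filter q).length)).map
                (fun c => x :: c)) ++
              pvCombos (xs.filter (fun j => !q j)) ((r - (xs.filter q).length) + 1) := rfl
          rw [hunfoldF, List.map_append, List.map_map, List.map_map]
          congr 1
          apply List.map_congr_left
          intro c hc
          simp only [Function.comp]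
          exact (pvMerge_cons_right x _ c hM').symm
        · by_cases heq : (xs.filter q).length = r + 1
          · rw [if_neg hle, if_pos (by omega), if_pos (by omega)]
            simp [heq, pvCombos]
          · rw [if_neg hle, if_neg (by omega), if_neg (by omega), List.map_nil,
                List.nil_append]

-- membership in the two sets agrees on every character
theorem pvSetsAgree (chars l2 : List Char) (c : Char) :
    PySem.Set.contains
      (PySem.Set.diff (PySem.Set.ofList chars) (PySem.Set.ofList l2)) c
    = PySem.Set.contains
      (PySem.Set.ofList (chars.filter
        (fun c => !(PySem.Set.contains (PySem.Set.ofList l2) c)))) c := by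
  rw [Bool.eq_iff_iff, PySem.Set.contains_iff, PySem.Set.contains_iff,
      PySem.Set.mem_diff, PySem.Set.mem_ofList, PySem.Set.mem_ofList,
      PySem.Set.mem_ofList, List.mem_filter]
  simp [PySem.Set.mem_ofList]

theorem pvLenFilterAdd {α : Type} (p : α → Bool) (l : List α) :
    (l.filter p).length + (l.filter (fun x => !p x)).length = l.length := by
  induction l with
  | nil => rfl
  | cons a l ih =>
    by_cases h : p a = true <;>
      simp [h, ← ih] <;> omega

-- ===== VERDICT (by name: the statement is the Claim_ definition above) =====
theorem exclusions_lazy_spec : Claim_equal_exclusions_lazy := by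
  intro it1 it2 _
  show exclusions_lazy it1 it2 = exclusions_lazy_alt it1 it2
  simp only [exclusions_lazy, exclusions_lazy_alt]
  set chars := it1.toList with hchars
  set required : PySem.Set Char :=
    PySem.Set.diff (PySem.Set.ofList chars) (PySem.Set.ofList it2.toList) with hreq
  set exclusive : PySem.Set Char :=
    PySem.Set.ofList (chars.filter
      (fun c => !(PySem.Set.contains (PySem.Set.ofList it2.toList) c))) with hexc
  have hAg : ∀ c : Char, PySem.Set.contains exclusive c = PySem.Set.contains required c := by
    intro c
    rw [hreq, hexc]
    exact (pvSetsAgree chars it2.toList c).symm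
  simp only [hAg]
  set q : Nat → Bool := fun j => PySem.Set.contains required (chars.getD j ' ') with hq
  set must := (List.range chars.length).filter q with hmust
  set free := (List.range chars.length).filter (fun j => !q j) with hfree
  set S : Nat → List String := fun k =>
    (pvCombos free k).map (fun fcomb =>
      String.ofList ((pvMerge must fcomb).map (fun i => chars.getD i ' '))) with hS
  have hterm : ∀ r, (pvCombos (List.range chars.length) r).filterMap (fun comb =>
      if required.all (fun sym =>
           PySem.Dict.getD (PySem.Dict.counter (comb.map (fun i => chars.getD i ' '))) sym 0 ==
           PySem.Dict.getD (PySem.Dict.counter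
             (chars.filter (fun c => PySem.Set.contains required c))) sym 0)
      then some (String.ofList (comb.map (fun i => chars.getD i ' '))) else none)
      = if must.length ≤ r then S (r - must.length) else [] := by
    intro r
    rw [pvFilterMap_if]
    have hcong : (pvCombos (List.range chars.length) r).filter (fun comb =>
        required.all (fun sym =>
          PySem.Dict.getD (PySem.Dict.counter (comb.map (fun i => chars.getD i ' '))) sym 0 ==
          PySem.Dict.getD (PySem.Dict.counter
            (chars.filter (fun c => PySem.Set.contains required c))) sym 0))
        = (pvCombos (List.range chars.length) r).filter
            (fun comb => must.all (fun j => decide (j ∈ comb))) := by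
      apply List.filter_congr
      intro comb hc
      exact pvCondAEq chars required comb (pvCombos_sublist hc)
    rw [hcong, pvFilterEqMerge q (List.range chars.length) (List.pairwise_lt_range) r,
        ← hmust, ← hfree]
    by_cases hle : must.length ≤ r
    · rw [if_pos hle, if_pos hle, hS, List.map_map]
      rfl
    · rw [if_neg hle, if_neg hle, List.map_nil]
  have hlen : must.length + free.length = chars.length := by
    rw [hmust, hfree, pvLenFilterAdd q (List.range chars.length), List.length_range]
  by_cases hm0 : must.isEmpty
  · -- no mandatory positions: both sides run over sizes 1..n
    have hm : must.length = 0 := by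
      rw [List.isEmpty_iff] at hm0; rw [hm0]; rfl
    rw [if_pos hm0]
    have hfl : free.length + 1 - 1 = chars.length := by omega
    rw [hfl]
    apply List.flatMap_congr
    intro r hr
    rw [hterm r, hm, if_pos (Nat.zero_le r), Nat.sub_zero]
  · -- must positions exist: A's sizes 1..must.length-1 contribute nothing
    have hm : 1 ≤ must.length := by
      rcases hE : must with _ | ⟨y, M⟩
      · rw [hE] at hm0; simp at hm0
      · simp
    rw [if_neg hm0, Nat.sub_zero]
    have hsplit : List.range' 1 chars.length =
        List.range' 1 (must.length - 1) ++ List.range' must.length (free.length + 1) := by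
      have h1 : (must.length - 1) + (free.length + 1) = chars.length := by omega
      have h2 : 1 + 1 * (must.length - 1) = must.length := by omega
      rw [← h1, ← List.range'_append, h2]
    rw [hsplit, List.flatMap_append]
    have hnil : (List.range' 1 (must.length - 1)).flatMap (fun r =>
        (pvCombos (List.range chars.length) r).filterMap (fun comb =>
          if required.all (fun sym =>
               PySem.Dict.getD (PySem.Dict.counter (comb.map (fun i => chars.getD i ' '))) sym 0 ==
               PySem.Dict.getD (PySem.Dict.counter
                 (chars.filter (fun c => PySem.Set.contains required c))) sym 0)
          then some (String.ofList (comb.map (fun i => chars.getD i ' '))) else none)) = [] := by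
      rw [List.flatMap_eq_nil_iff]
      intro r hr
      rw [hterm r]
      rw [List.mem_range'_1] at hr
      rw [if_neg (by omega)]
    rw [hnil, List.nil_append]
    have hshift : List.range' must.length (free.length + 1) =
        (List.range' 0 (free.length + 1)).map (fun k => k + must.length) := by
      rw [List.range'_eq_map_range, List.range'_eq_map_range, List.map_map]
      apply List.map_congr_left
      intro k _
      simp [Function.comp]
      omega
    rw [hshift, List.flatMap_map]
    apply List.flatMap_congr
    intro k hk
    rw [hterm (k + must.length), if_pos (by omega), Nat.add_sub_cancel]
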